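-- pv_equiv track=rewrite | github.com/e-apostolov/SoftUni_Fundamentals | 08062023_Advanced_List_Ex/anonymous_threat.py | divide_word
-- ===== SOURCE A (Python) =====
-- def divide_word(some_string, some_index, partitions):
--     word_to_be_divided = some_string.pop(int(some_index))
--     letters_in_each_new_string = len(word_to_be_divided) // int(partitions)
--     if letters_in_each_new_string < 1:
--         letters_in_each_new_string = 1
--     start = 0
--     for additions in range(int(partitions)):
--         if additions == int(partitions) - 1:
--             some_string.insert(some_index, word_to_be_divided[start:])
--             break
--         else:
--             some_string.insert(int(some_index), word_to_be_divided[start:start + int(letters_in_each_new_string)])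
--         start += letters_in_each_new_string
--         some_index = int(some_index) + 1
--     return some_string
-- ===== SOURCE B (Python) =====
-- def divide_word(some_string, some_index, partitions):
--     idx = int(some_index)
--     pos = idx if idx >= 0 else idx + len(some_string)
--     word = some_string.pop(idx)
--     size = len(word) // int(partitions)
--     if size < 1:
--         size = 1
--     # peel the size-prefix off the remaining word until one piece is left;
--     # no start offsets and no per-piece list inserts
--     pieces = []
--     w = word
--     n = int(partitions)
--     while n > 1:
--         pieces.append(w[:size])
--         w = w[size:]
--         n -= 1
--     if n == 1:
--         pieces.append(w)
--     some_string[pos:pos] = pieces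
--     return some_string
-- ===== Notes on version B (the rewrite author's own statement) =====
-- stated objective: faster
-- what changed: A keeps a running start offset and a moving insertion index and inserts each computed slice into the list one at a time (each insert shifts the whole list tail); B has no index arithmetic over the word at all: a peel loop repeatedly takes w[:size] off the remaining word (w = w[size:]) to build the piece list, then splices it in with one slice assignment at the pop position.
-- intended difference: For a negative some_index with partitions >= 1, A's chain of negative-index inserts scatters the pieces (e.g. ['ab','cd'], -1, 2 -> ['d','c','ab']) because each insert re-interprets the still-negative index against the growing list; B puts the pieces contiguously at the popped word's position (['ab','c','d']), which is the intended splitting behaviour. — e.g. on divide_word(["ab", "cd"], -1, 2): A returns ["d", "c", "ab"], B returns ["ab", "c", "d"]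
import Mathlib
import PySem

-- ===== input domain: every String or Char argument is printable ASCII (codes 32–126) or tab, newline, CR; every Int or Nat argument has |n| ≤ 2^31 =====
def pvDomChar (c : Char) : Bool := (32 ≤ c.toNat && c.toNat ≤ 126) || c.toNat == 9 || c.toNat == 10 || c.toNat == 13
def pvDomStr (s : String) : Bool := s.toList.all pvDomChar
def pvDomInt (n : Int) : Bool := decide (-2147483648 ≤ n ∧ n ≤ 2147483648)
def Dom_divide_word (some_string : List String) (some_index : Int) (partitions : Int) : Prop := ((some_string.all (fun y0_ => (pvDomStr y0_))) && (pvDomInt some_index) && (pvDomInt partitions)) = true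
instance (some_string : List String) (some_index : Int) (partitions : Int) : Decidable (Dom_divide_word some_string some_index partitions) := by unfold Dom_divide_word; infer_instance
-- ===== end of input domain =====

-- B replaces A's indexed insert loop by a recursive prefix-peeling of the word plus one splice; equivalence is
-- about the return value (both Pythons also mutate some_string in place, identically outside D_).

-- ===== PORT A =====
-- A-side helper: the body of A's `for additions in range(int(partitions))` loop; state = (some_string, start, some_index)
def divideLoop (w : String) (p sz : Int) (st : List String × Int × Int) (k : Int) : List String × Int × Int :=
  if k = p - 1 then
    (PySem.List.insert st.1 st.2.2 (PySem.Str.slice w (some st.2.1) none), st.2.1, st.2.2)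
  else
    (PySem.List.insert st.1 st.2.2 (PySem.Str.slice w (some st.2.1) (some (st.2.1 + sz))), st.2.1 + sz, st.2.2 + 1)

def divide_word (some_string : List String) (some_index : Int) (partitions : Int) : List String :=
  match PySem.List.pop? some_string some_index with
  | none => some_string        -- Python raises IndexError here (outside Pre_)
  | some (word, rest) =>
    -- partitions = 0 raises ZeroDivisionError in Python (outside Pre_)
    let letters0 := PySem.Int.floordiv (PySem.Str.len word) partitions
    let letters := if letters0 < 1 then 1 else letters0
    ((PySem.List.pyRange 0 partitions 1).foldl (divideLoop word partitions letters) (rest, 0, some_index)).1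

-- ===== PORT B =====
-- B-side helper: Source B's peel loop (append w[:size], w = w[size:], n -= 1, final piece when n == 1),
-- written as recursion on the Nat fuel n.toNat = the number of pieces produced
def peelGo (sz : Int) : String → Nat → List String
  | _, 0 => []                    -- n <= 0: peel returns []
  | w, 1 => [w]                   -- n == 1: peel returns [w]
  | w, (f+2) => PySem.Str.slice w none (some sz) :: peelGo sz (PySem.Str.slice w (some sz) none) (f+1)

def peel (sz : Int) (w : String) (n : Int) : List String := peelGo sz w n.toNat

def divide_word_alt (some_string : List String) (some_index : Int) (partitions : Int) : List String :=
  let pos := if some_index ≥ 0 then some_index else some_index + some_string.length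
  match PySem.List.pop? some_string some_index with
  | none => some_string        -- Python raises IndexError here (outside Pre_)
  | some (word, rest) =>
    let size0 := PySem.Int.floordiv (PySem.Str.len word) partitions
    let size := if size0 < 1 then 1 else size0
    -- `some_string[pos:pos] = pieces`: Python slice assignment, hand-ported (exact: clamps pos into [0, len])
    let j := (min (max pos 0) (rest.length : Int)).toNat
    rest.take j ++ peel size word partitions ++ rest.drop j

-- ===== PRECONDITION & SPEC =====
-- Pre_ excludes exactly the inputs where A raises: partitions = 0 (ZeroDivisionError) and a pop index
-- out of range (IndexError).
def Pre_divide_word (some_string : List String) (some_index : Int) (partitions : Int) : Prop :=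
  partitions ≠ 0 ∧ -(some_string.length : Int) ≤ some_index ∧ some_index < some_string.length
instance (some_string : List String) (some_index : Int) (partitions : Int) : Decidable (Pre_divide_word some_string some_index partitions) := by unfold Pre_divide_word; infer_instance
def pvWitness_divide_word : List String × Int × Int := (["ab", "cdefg", "x"], 1, 2)

-- For a negative some_index with partitions ≥ 1, A's chain of negative-index inserts scatters the pieces
-- (each insert re-interprets the still-negative index against the grown list); B places the pieces
-- contiguously at the popped word's position, which is the intended splitting behaviour.
def D_divide_word (some_string : List String) (some_index : Int) (partitions : Int) : Prop :=
  some_index < 0 ∧ 1 ≤ partitions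
instance (some_string : List String) (some_index : Int) (partitions : Int) : Decidable (D_divide_word some_string some_index partitions) := by unfold D_divide_word; infer_instance

def Spec_divide_word (some_string : List String) (some_index : Int) (partitions : Int) (out : List String) : Prop := ¬ D_divide_word some_string some_index partitions → out = divide_word_alt some_string some_index partitions
instance (some_string : List String) (some_index : Int) (partitions : Int) (out : List String) : Decidable (Spec_divide_word some_string some_index partitions out) := by unfold Spec_divide_word; infer_instance

def pvDiffWitness_divide_word : List String × Int × Int := (["ab", "cd"], -1, 2)
def pvDiffWitnessOut_divide_word : (List String) × (List String) := (["d", "c", "ab"], ["ab", "c", "d"])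

-- ===== CLAIM (what is proved, stated in full; the proofs are below) =====
def Claim_unchanged_divide_word : Prop := ∀ (some_string : List String) (some_index : Int) (partitions : Int), Dom_divide_word some_string some_index partitions → Pre_divide_word some_string some_index partitions → Spec_divide_word some_string some_index partitions (divide_word some_string some_index partitions)
def Claim_changed_divide_word : Prop := Dom_divide_word (pvDiffWitness_divide_word.1) (pvDiffWitness_divide_word.2.1) (pvDiffWitness_divide_word.2.2) ∧ Pre_divide_word (pvDiffWitness_divide_word.1) (pvDiffWitness_divide_word.2.1) (pvDiffWitness_divide_word.2.2) ∧ D_divide_word (pvDiffWitness_divide_word.1) (pvDiffWitness_divide_word.2.1) (pvDiffWitness_divide_word.2.2) ∧ divide_word (pvDiffWitness_divide_word.1) (pvDiffWitness_divide_word.2.1) (pvDiffWitness_divide_word.2.2) = pvDiffWitnessOut_divide_word.1 ∧ divide_word_alt (pvDiffWitness_divide_word.1) (pvDiffWitness_divide_word.2.1) (pvDiffWitness_divide_word.2.2) = pvDiffWitnessOut_divide_word.2 ∧ pvDiffWitnessOut_divide_word.1 ≠ pvDiffWitnessOut_divide_word.2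

-- ===== LEMMAS AND PROOFS =====

-- the contiguous pieces word[s:s+sz], word[s+sz:s+2sz], …, word[s+(m-1)sz:] (m pieces)
def piecesRec (w : String) (sz : Int) : Nat → Int → List String
  | 0, _ => []
  | 1, s => [PySem.Str.slice w (some s) none]
  | (m+2), s => PySem.Str.slice w (some s) (some (s + sz)) :: piecesRec w sz (m+1) (s + sz)

theorem insert_eq_of_in_range {α : Type} (lst : List α) (i : Int) (v : α)
    (h0 : 0 ≤ i) (h1 : i.toNat ≤ lst.length) :
    PySem.List.insert lst i v = lst.take i.toNat ++ v :: lst.drop i.toNat := by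
  simp [PySem.List.insert, PySem.List.sliceIndices]
  have h : (if i < 0 then max (i + (lst.length : Int)) 0 else min i (lst.length : Int)) = i := by
    split_ifs <;> omega
  rw [h]

theorem loopA_eq (w : String) (p sz : Int) :
    ∀ (m : Nat) (c : Int) (lst : List String) (s i : Int),
    1 ≤ m → c + m = p → 0 ≤ i → i.toNat ≤ lst.length →
    ((PySem.List.pyRange c p 1).foldl (divideLoop w p sz) (lst, s, i)).1
      = lst.take i.toNat ++ piecesRec w sz m s ++ lst.drop i.toNat := by
  intro m
  induction m with
  | zero => intro c lst s i hm; omega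
  | succ m' ih =>
    intro c lst s i hm hc hi0 hile
    match m' with
    | 0 =>
      have hclt : c < p := by omega
      rw [PySem.List.pyRange_one_cons hclt, PySem.List.pyRange_one_eq_nil (by omega : p ≤ c + 1)]
      simp only [List.foldl_cons, List.foldl_nil, divideLoop, if_pos (by omega : c = p - 1)]
      rw [insert_eq_of_in_range lst i _ hi0 hile]
      simp [piecesRec]
    | m'' + 1 =>
      have hclt : c < p := by omega
      rw [PySem.List.pyRange_one_cons hclt]
      simp only [List.foldl_cons, divideLoop, if_neg (by omega : ¬ c = p - 1)]
      rw [insert_eq_of_in_range lst i _ hi0 hile]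
      have htk : (lst.take i.toNat).length = i.toNat := by simp [hile]
      have hlen' : (lst.take i.toNat ++ PySem.Str.slice w (some s) (some (s + sz)) :: lst.drop i.toNat).length = lst.length + 1 := by
        simp
      have := ih (c + 1) (lst.take i.toNat ++ PySem.Str.slice w (some s) (some (s + sz)) :: lst.drop i.toNat)
        (s + sz) (i + 1) (by omega) (by omega) (by omega) (by rw [hlen']; omega)
      rw [this]
      have h1 : (i + 1).toNat = i.toNat + 1 := by omega
      have htake : (lst.take i.toNat ++ PySem.Str.slice w (some s) (some (s + sz)) :: lst.drop i.toNat).take (i.toNat + 1)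
          = lst.take i.toNat ++ [PySem.Str.slice w (some s) (some (s + sz))] := by
        rw [show lst.take i.toNat ++ PySem.Str.slice w (some s) (some (s + sz)) :: lst.drop i.toNat
              = (lst.take i.toNat ++ [PySem.Str.slice w (some s) (some (s + sz))]) ++ lst.drop i.toNat by simp]
        exact List.take_left' (by simp [htk])
      have hdrop : (lst.take i.toNat ++ PySem.Str.slice w (some s) (some (s + sz)) :: lst.drop i.toNat).drop (i.toNat + 1)
          = lst.drop i.toNat := by
        rw [show lst.take i.toNat ++ PySem.Str.slice w (some s) (some (s + sz)) :: lst.drop i.toNat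
              = (lst.take i.toNat ++ [PySem.Str.slice w (some s) (some (s + sz))]) ++ lst.drop i.toNat by simp]
        exact List.drop_left' (by simp [htk])
      rw [h1, htake, hdrop]
      simp [piecesRec]

-- B's peel, applied to the remaining suffix of the word, yields the same contiguous pieces
theorem peelGo_eq (w : String) (sz : Int) (hsz : 1 ≤ sz) :
    ∀ (m : Nat) (w' : String) (s : Int), 1 ≤ m → 0 ≤ s →
    w'.toList = w.toList.drop s.toNat →
    peelGo sz w' m = piecesRec w sz m s := by
  intro m
  induction m with
  | zero => intro w' s hm; omega
  | succ m' ih =>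
    intro w' s hm hs hw'
    match m' with
    | 0 =>
      simp only [peelGo, piecesRec]
      have h : (PySem.Str.slice w (some s) none).toList = w.toList.drop s.toNat := by
        simp [PySem.List.slice_from w.toList hs]
      exact congrArg (fun x => [x]) (String.toList_inj.mp (hw'.trans h.symm))
    | m'' + 1 =>
      simp only [peelGo, piecesRec]
      congr 1
      · apply String.toList_inj.mp
        have h1 : (PySem.Str.slice w' none (some sz)).toList = w'.toList.take sz.toNat := by
          simp [PySem.List.slice_to w'.toList (by omega : (0:Int) ≤ sz)]
        have h2 : (PySem.Str.slice w (some s) (some (s + sz))).toList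
            = (w.toList.drop s.toNat).take ((s + sz).toNat - s.toNat) := by
          simp [PySem.List.slice_toNat w.toList hs (by omega : (0:Int) ≤ s + sz)]
        rw [h1, h2, hw', show (s + sz).toNat - s.toNat = sz.toNat by omega]
      · apply ih _ (s + sz) (by omega) (by omega)
        have h3 : (PySem.Str.slice w' (some sz) none).toList = w'.toList.drop sz.toNat := by
          simp [PySem.List.slice_from w'.toList (by omega : (0:Int) ≤ sz)]
        rw [h3, hw', List.drop_drop, show s.toNat + sz.toNat = (s + sz).toNat by omega]

-- ===== VERDICT (by name: the statement is the Claim_ definition above) =====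
theorem divide_word_spec : Claim_unchanged_divide_word := by
  intro ss i p hdom hpre hnd
  obtain ⟨hp0, hlo, hhi⟩ := hpre
  show divide_word ss i p = divide_word_alt ss i p
  cases hpop : PySem.List.pop? ss i with
  | none => simp [divide_word, divide_word_alt, hpop]
  | some r =>
    obtain ⟨word, rest⟩ := r
    have hlen : rest.length + 1 = ss.length := PySem.List.length_of_pop?_eq_some ss hpop
    by_cases hp1 : 1 ≤ p
    · have hi0 : 0 ≤ i := by
        by_contra h
        exact hnd ⟨by omega, hp1⟩
      have hile : i.toNat ≤ rest.length := by omega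
      simp only [divide_word, divide_word_alt, hpop, peel]
      rw [loopA_eq word p _ p.toNat 0 rest 0 i (by omega) (by omega) hi0 hile]
      have hsz : (1:Int) ≤ (if PySem.Int.floordiv (PySem.Str.len word) p < 1 then 1
          else PySem.Int.floordiv (PySem.Str.len word) p) := by
        split_ifs <;> omega
      rw [peelGo_eq word _ hsz p.toNat word 0 (by omega) (by omega) (by simp)]
      rw [if_pos (by omega : i ≥ 0)]
      rw [show (min (max i 0) (rest.length : Int)).toNat = i.toNat by omega]
    · have hpneg : p ≤ -1 := by omega
      simp only [divide_word, divide_word_alt, hpop, peel]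
      rw [PySem.List.pyRange_one_eq_nil (by omega : p ≤ 0)]
      rw [show p.toNat = 0 by omega]
      simp only [peelGo, List.foldl_nil, List.append_nil]
      exact (List.take_append_drop _ rest).symm

theorem divide_word_changed : Claim_changed_divide_word := by
  unfold Claim_changed_divide_word; decide
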